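-- pv_equiv track=rewrite | github.com/the-ride-never-ends/documentation_generator | utils/parser.py | _parse_google_raises
-- ===== SOURCE A (Python) =====
-- from typing import Dict, List, Any, Optional, Tuple
--
-- def _parse_google_raises(content: str) -> List[Dict[str, str]]:
--     """
--     Parse Google-style raises section.
--
--     Args:
--         content: Raises section content
--
--     Returns:
--         List of exception dictionaries with type and description
--     """
--     exceptions = []
--     lines = content.splitlines()
--     current_exception = None
--     current_description = []
--
--     for line in lines:
--         stripped = line.strip()
--         if not stripped:
--             continue
--
--         indentation = len(line) - len(line.lstrip())
--
--         # New exception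
--         if indentation == 0 or (current_exception is None and stripped):
--             # Save previous exception
--             if current_exception and current_description:
--                 exceptions.append({
--                     "type": current_exception,
--                     "description": '\n'.join(current_description).strip()
--                 })
--
--             # Parse new exception line
--             parts = stripped.split(':', 1)
--             current_exception = parts[0].strip()
--             current_description = []
--
--             if len(parts) > 1:
--                 current_description.append(parts[1].strip())
--         else:
--             current_description.append(stripped)
--
--     # Save last exception
--     if current_exception and current_description:
--         exceptions.append({
--             "type": current_exception,
--             "description": '\n'.join(current_description).strip()
--         })
--
--     return exceptions
-- ===== SOURCE B (Python) =====
-- from typing import Dict, List, Any, Optional, Tuple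
--
-- def _split_header(header: str) -> Tuple[str, List[str]]:
--     """Split a block header on the first ':' into (type, initial description fragments)."""
--     parts = header.split(':', 1)
--     return parts[0].strip(), [parts[1].strip()] if len(parts) > 1 else []
--
-- def _parse_google_raises(content: str) -> List[Dict[str, str]]:
--     # Pass 1: group the non-empty lines into blocks; a block starts at the first
--     # non-empty line (any indentation) and at every later zero-indentation line.
--     blocks: List[List[str]] = []
--     for line in content.splitlines():
--         stripped = line.strip()
--         if not stripped:
--             continue
--         if not blocks or len(line) - len(line.lstrip()) == 0:
--             blocks.append([stripped])
--         else:
--             blocks[-1].append(stripped)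
--     # Pass 2: turn each block into an exception dict; drop blocks with an empty
--     # type or no description fragments at all.
--     out: List[Dict[str, str]] = []
--     for block in blocks:
--         typ, frags = _split_header(block[0])
--         frags = frags + block[1:]
--         if typ and frags:
--             out.append({"type": typ, "description": '\n'.join(frags).strip()})
--     return out
-- ===== Notes on version B (the rewrite author's own statement) =====
-- stated objective: simpler
-- what changed: A's single stateful loop (current exception + description accumulator + end-of-loop flush) is replaced by two passes: group non-empty lines into blocks, then map each block to a dict independently.
import Mathlib
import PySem

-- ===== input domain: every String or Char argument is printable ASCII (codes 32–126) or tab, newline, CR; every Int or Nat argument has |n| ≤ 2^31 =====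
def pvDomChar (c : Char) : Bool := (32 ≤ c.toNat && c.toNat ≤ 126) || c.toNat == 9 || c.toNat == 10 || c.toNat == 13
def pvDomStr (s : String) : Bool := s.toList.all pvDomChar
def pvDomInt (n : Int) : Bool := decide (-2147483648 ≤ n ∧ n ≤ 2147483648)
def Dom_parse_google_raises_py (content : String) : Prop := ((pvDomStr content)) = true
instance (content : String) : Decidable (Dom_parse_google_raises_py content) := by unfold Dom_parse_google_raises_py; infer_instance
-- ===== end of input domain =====

-- B re-implements A as group-lines-into-blocks then map-each-block-to-a-dict (same return value; objective: simpler decomposition).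

-- ===== PORT A =====
-- parts = stripped.split(':', 1); type = parts[0].strip(); initial description = [parts[1].strip()] if a ':' was present
def pvParseHead (header : String) : String × List String :=
  match PySem.Str.splitMax? header ":" 1 with
  | some (p0 :: p1 :: _) => (PySem.Str.strip p0, [PySem.Str.strip p1])
  | some (p0 :: []) => (PySem.Str.strip p0, [])
  | _ => (PySem.Str.strip header, [])  -- unreachable: ":" ≠ ""

-- the dict appended for a finished exception
def pvDict (e : String) (desc : List String) : List (String × String) :=
  [("type", e), ("description", PySem.Str.strip (PySem.Str.join "\n" desc))]

-- "if current_exception and current_description: exceptions.append(...)" (appears in the loop and after it)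
def pvSave (exceptions : List (List (String × String))) (curExc : Option String)
    (curDesc : List String) : List (List (String × String)) :=
  match curExc with
  | some e => if e ≠ "" ∧ curDesc ≠ [] then exceptions ++ [pvDict e curDesc] else exceptions
  | none => exceptions

-- one iteration of A's for-loop; state = (exceptions, current_exception, current_description)
def pvAStep : (List (List (String × String)) × Option String × List String) → String →
    List (List (String × String)) × Option String × List String
  | (exceptions, curExc, curDesc), line =>
    let stripped := PySem.Str.strip line
    if stripped = "" then (exceptions, curExc, curDesc)
    else
      let indentation := PySem.Str.len line - PySem.Str.len (PySem.Str.lstrip line)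
      if indentation = 0 ∨ (curExc = none ∧ stripped ≠ "") then
        let td := pvParseHead stripped
        (pvSave exceptions curExc curDesc, some td.1, td.2)
      else
        (exceptions, curExc, curDesc ++ [stripped])

-- the trailing "save last exception"
def pvFlush : (List (List (String × String)) × Option String × List String) →
    List (List (String × String))
  | (exceptions, curExc, curDesc) => pvSave exceptions curExc curDesc

def parse_google_raises_py (content : String) : List (List (String × String)) :=
  pvFlush ((PySem.Str.splitlines content).foldl pvAStep ([], none, []))

-- ===== PORT B =====
-- pass 1: group the non-empty lines into blocks of stripped lines
def pvBStep (blocks : List (List String)) (line : String) : List (List String) :=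
  let stripped := PySem.Str.strip line
  if stripped = "" then blocks
  else if blocks = [] ∨ PySem.Str.len line - PySem.Str.len (PySem.Str.lstrip line) = 0 then
    blocks ++ [[stripped]]
  else blocks.dropLast ++ [blocks.getLast! ++ [stripped]]

-- pass 2: one block → an optional exception dict
def pvBlockDict : List String → Option (List (String × String))
  | [] => none
  | head :: rest =>
    let (typ, frags0) := pvParseHead head
    let frags := frags0 ++ rest
    if typ ≠ "" ∧ frags ≠ [] then some (pvDict typ frags) else none

def parse_google_raises_py_alt (content : String) : List (List (String × String)) :=
  (((PySem.Str.splitlines content).foldl pvBStep []).filterMap pvBlockDict)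

-- ===== PRECONDITION & SPEC =====
def Spec_parse_google_raises_py (content : String) (out : List (List (String × String))) : Prop := out = parse_google_raises_py_alt content
instance (content : String) (out : List (List (String × String))) : Decidable (Spec_parse_google_raises_py content out) := by unfold Spec_parse_google_raises_py; infer_instance

-- ===== CLAIM (what is proved, stated in full; the proofs are below) =====
def Claim_equal_parse_google_raises_py : Prop := ∀ (content : String), Dom_parse_google_raises_py content → Spec_parse_google_raises_py content (parse_google_raises_py content)

-- ===== LEMMAS AND PROOFS =====

theorem pvGetLastBang_append_singleton {α : Type} [Inhabited α] (l : List α) (a : α) :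
    (l ++ [a]).getLast! = a := by
  induction l with
  | nil => rfl
  | cons x xs ih =>
    cases xs with
    | nil => rfl
    | cons y ys => simp [List.getLast!]

-- the three shapes of one iteration of A's loop
theorem pvAStep_blank (l : String) (exc : List (List (String × String))) (c : Option String)
    (d : List String) (hs : PySem.Str.strip l = "") : pvAStep (exc, c, d) l = (exc, c, d) := by
  simp only [pvAStep]; rw [if_pos hs]

theorem pvAStep_new (l : String) (exc : List (List (String × String))) (c : Option String)
    (d : List String) (hs : ¬ PySem.Str.strip l = "")
    (hc : PySem.Str.len l - PySem.Str.len (PySem.Str.lstrip l) = 0 ∨ (c = none ∧ PySem.Str.strip l ≠ "")) :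
    pvAStep (exc, c, d) l = (pvSave exc c d, some (pvParseHead (PySem.Str.strip l)).1, (pvParseHead (PySem.Str.strip l)).2) := by
  simp only [pvAStep]; rw [if_neg hs, if_pos hc]

theorem pvAStep_cont (l : String) (exc : List (List (String × String))) (c : Option String)
    (d : List String) (hs : ¬ PySem.Str.strip l = "")
    (hc : ¬ (PySem.Str.len l - PySem.Str.len (PySem.Str.lstrip l) = 0 ∨ (c = none ∧ PySem.Str.strip l ≠ ""))) :
    pvAStep (exc, c, d) l = (exc, c, d ++ [PySem.Str.strip l]) := by
  simp only [pvAStep]; rw [if_neg hs, if_neg hc]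

-- the three shapes of one iteration of B's grouping loop
theorem pvBStep_blank (bs : List (List String)) (l : String) (hs : PySem.Str.strip l = "") :
    pvBStep bs l = bs := by
  simp only [pvBStep]; rw [if_pos hs]

theorem pvBStep_new (bs : List (List String)) (l : String) (hs : ¬ PySem.Str.strip l = "")
    (hc : bs = [] ∨ PySem.Str.len l - PySem.Str.len (PySem.Str.lstrip l) = 0) :
    pvBStep bs l = bs ++ [[PySem.Str.strip l]] := by
  simp only [pvBStep]; rw [if_neg hs, if_pos hc]

theorem pvBStep_cont (bs : List (List String)) (l : String) (hs : ¬ PySem.Str.strip l = "")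
    (hc : ¬ (bs = [] ∨ PySem.Str.len l - PySem.Str.len (PySem.Str.lstrip l) = 0)) :
    pvBStep bs l = bs.dropLast ++ [bs.getLast! ++ [PySem.Str.strip l]] := by
  simp only [pvBStep]; rw [if_neg hs, if_neg hc]

-- A's loop only ever appends to the exceptions list: it factors out of the fold+flush.
theorem pvA_factor (lines : List String) (exc : List (List (String × String)))
    (c : Option String) (d : List String) :
    pvFlush (lines.foldl pvAStep (exc, c, d)) = exc ++ pvFlush (lines.foldl pvAStep ([], c, d)) := by
  induction lines generalizing exc c d with
  | nil =>
    simp only [List.foldl_nil, pvFlush]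
    cases c with
    | none => simp [pvSave]
    | some e => by_cases h : e ≠ "" ∧ d ≠ [] <;> simp [pvSave, h]
  | cons l ls ih =>
    simp only [List.foldl_cons]
    by_cases hs : PySem.Str.strip l = ""
    · rw [pvAStep_blank l exc c d hs, pvAStep_blank l [] c d hs]
      exact ih exc c d
    · by_cases hc : (PySem.Str.len l - PySem.Str.len (PySem.Str.lstrip l) = 0 ∨ (c = none ∧ PySem.Str.strip l ≠ ""))
      · rw [pvAStep_new l exc c d hs hc, pvAStep_new l [] c d hs hc, ih, ih (pvSave [] c d)]
        have : pvSave exc c d = exc ++ pvSave [] c d := by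
          cases c with
          | none => simp [pvSave]
          | some e => by_cases h : e ≠ "" ∧ d ≠ [] <;> simp [pvSave, h]
        rw [this, List.append_assoc]
      · rw [pvAStep_cont l exc c d hs hc, pvAStep_cont l [] c d hs hc]
        exact ih exc c (d ++ [PySem.Str.strip l])

-- B's grouping loop never touches blocks other than the last one: a finished prefix factors out.
theorem pvB_factor (lines : List String) (bs : List (List String)) (cur : List String) :
    lines.foldl pvBStep (bs ++ [cur]) = bs ++ lines.foldl pvBStep [cur] := by
  induction lines generalizing bs cur with
  | nil => simp
  | cons l ls ih =>
    simp only [List.foldl_cons]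
    by_cases hs : PySem.Str.strip l = ""
    · rw [pvBStep_blank _ l hs, pvBStep_blank _ l hs]
      exact ih bs cur
    · by_cases hz : PySem.Str.len l - PySem.Str.len (PySem.Str.lstrip l) = 0
      · rw [pvBStep_new _ l hs (Or.inr hz), pvBStep_new [cur] l hs (Or.inr hz)]
        rw [show bs ++ [cur] ++ [[PySem.Str.strip l]] = (bs ++ [cur]) ++ [[PySem.Str.strip l]] from by simp,
            ih (bs ++ [cur]) [PySem.Str.strip l], ih [cur]]
        simp
      · have hc1 : ¬ (bs ++ [cur] = [] ∨ PySem.Str.len l - PySem.Str.len (PySem.Str.lstrip l) = 0) := by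
          rintro (h | h)
          · simp at h
          · exact hz h
        have hc2 : ¬ (([cur] : List (List String)) = [] ∨ PySem.Str.len l - PySem.Str.len (PySem.Str.lstrip l) = 0) := by
          rintro (h | h)
          · simp at h
          · exact hz h
        rw [pvBStep_cont _ l hs hc1, pvBStep_cont [cur] l hs hc2]
        rw [List.dropLast_concat, pvGetLastBang_append_singleton]
        rw [show ([cur] : List (List String)).dropLast = [] from rfl,
            show ([cur] : List (List String)).getLast! = cur from rfl, List.nil_append]
        exact ih bs (cur ++ [PySem.Str.strip l])

-- a block's optional dict, written out
theorem pvBlockDict_cons (head : String) (rest : List String) :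
    pvBlockDict (head :: rest) =
      (if (pvParseHead head).1 ≠ "" ∧ (pvParseHead head).2 ++ rest ≠ [] then
        some (pvDict (pvParseHead head).1 ((pvParseHead head).2 ++ rest)) else none) := by
  simp only [pvBlockDict]

-- filterMap over a single block is that block's optional dict
theorem pvFilterMap_single {a b : Type} (f : a → Option b) (x : a) :
    List.filterMap f [x] = (f x).toList := by
  cases h : f x <;> simp [h]

-- A's "save" of the open block computes exactly that block's optional dict
theorem pvSave_eq_blockDict (head : String) (rest : List String) :
    pvSave [] (some (pvParseHead head).1) ((pvParseHead head).2 ++ rest)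
      = (pvBlockDict (head :: rest)).toList := by
  rw [pvBlockDict_cons]
  simp only [pvSave]
  by_cases hk : (pvParseHead head).1 ≠ "" ∧ (pvParseHead head).2 ++ rest ≠ []
  · rw [if_pos hk, if_pos hk]; simp
  · rw [if_neg hk, if_neg hk]; simp

-- Core: with an open block (head :: rest), finishing A's loop equals grouping-then-mapping from that block.
theorem pvAB_open (lines : List String) (head : String) (rest : List String) :
    pvFlush (lines.foldl pvAStep ([], some (pvParseHead head).1, (pvParseHead head).2 ++ rest))
      = (lines.foldl pvBStep [head :: rest]).filterMap pvBlockDict := by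
  induction lines generalizing head rest with
  | nil =>
    simp only [List.foldl_nil, pvFlush]
    rw [pvFilterMap_single, pvSave_eq_blockDict]
  | cons l ls ih =>
    simp only [List.foldl_cons]
    by_cases hs : PySem.Str.strip l = ""
    · rw [pvAStep_blank _ _ _ _ hs, pvBStep_blank _ _ hs]
      exact ih head rest
    · by_cases hz : PySem.Str.len l - PySem.Str.len (PySem.Str.lstrip l) = 0
      · -- a new block starts: flush the open block on the A side, close it on the B side
        rw [pvAStep_new _ _ _ _ hs (Or.inl hz), pvBStep_new _ _ hs (Or.inr hz)]
        rw [pvA_factor, pvB_factor ls [head :: rest] [PySem.Str.strip l]]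
        rw [List.filterMap_append]
        have hopen := ih (PySem.Str.strip l) []
        simp only [List.append_nil] at hopen
        rw [hopen]
        congr 1
        rw [pvFilterMap_single, pvSave_eq_blockDict]
      · -- a continuation line: append to the open block on both sides
        have hcA : ¬ (PySem.Str.len l - PySem.Str.len (PySem.Str.lstrip l) = 0 ∨
            ((some (pvParseHead head).1 : Option String) = none ∧ PySem.Str.strip l ≠ "")) := by
          rintro (h | ⟨h, -⟩)
          · exact hz h
          · simp at h
        have hcB : ¬ (([head :: rest] : List (List String)) = [] ∨
            PySem.Str.len l - PySem.Str.len (PySem.Str.lstrip l) = 0) := by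
          rintro (h | h)
          · simp at h
          · exact hz h
        rw [pvAStep_cont _ _ _ _ hs hcA, pvBStep_cont _ _ hs hcB]
        rw [show ([head :: rest] : List (List String)).dropLast = [] from rfl,
            show ([head :: rest] : List (List String)).getLast! = head :: rest from rfl, List.nil_append]
        have := ih head (rest ++ [PySem.Str.strip l])
        simpa using this

-- Entry: from the empty state, A's loop equals B's group-then-map.
theorem pvAB_start (lines : List String) :
    pvFlush (lines.foldl pvAStep ([], none, [])) = (lines.foldl pvBStep []).filterMap pvBlockDict := by
  induction lines with
  | nil => simp [pvFlush, pvSave]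
  | cons l ls ih =>
    simp only [List.foldl_cons]
    by_cases hs : PySem.Str.strip l = ""
    · rw [pvAStep_blank _ _ _ _ hs, pvBStep_blank _ _ hs]
      exact ih
    · rw [pvAStep_new _ _ _ _ hs (Or.inr ⟨rfl, hs⟩), pvBStep_new _ _ hs (Or.inl rfl)]
      simp only [pvSave, List.nil_append]
      have := pvAB_open ls (PySem.Str.strip l) []
      simpa using this

-- ===== VERDICT (by name: the statement is the Claim_ definition above) =====
theorem parse_google_raises_py_spec : Claim_equal_parse_google_raises_py := by
  intro content _
  unfold Spec_parse_google_raises_py parse_google_raises_py parse_google_raises_py_alt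
  exact pvAB_start (PySem.Str.splitlines content)
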